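-- pv_equiv track=rewrite | github.com/krutizmi-cpu/pim | services/detmir_api_service.py | _detmir_attribute_code
-- ===== SOURCE A (Python) =====
-- _DETMIR_SHARED_ATTRIBUTE_CODES: dict[str, str] = {
--     "brand": "brand",
--     "model": "model",
--     "strana_proizvodstva": "country_of_origin",
--     "pol": "gender",
--     "material_igr_osn": "material",
--     "cvet_f": "color",
--     "equipment": "equipment",
-- }
--
-- def _detmir_attribute_code(attribute_key: str, attribute_name: str | None = None) -> str:
--     raw_key = str(attribute_key or "").strip()
--     if raw_key in _DETMIR_SHARED_ATTRIBUTE_CODES: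
--         return _DETMIR_SHARED_ATTRIBUTE_CODES[raw_key]
--     safe = raw_key.lower().strip()
--     safe = "".join(ch if ch.isalnum() or ch == "_" else "_" for ch in safe)
--     safe = "_".join(part for part in safe.split("_") if part)
--     if not safe:
--         fallback = str(attribute_name or "field").strip().lower()
--         fallback = "".join(ch if ch.isalnum() or ch == "_" else "_" for ch in fallback)
--         safe = "_".join(part for part in fallback.split("_") if part) or "field"
--     return f"detmir_attr_{safe}"
-- ===== SOURCE B (Python) =====
-- _DETMIR_SHARED_ATTRIBUTE_CODES: dict[str, str] = {
--     "brand": "brand",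
--     "model": "model",
--     "strana_proizvodstva": "country_of_origin",
--     "pol": "gender",
--     "material_igr_osn": "material",
--     "cvet_f": "color",
--     "equipment": "equipment",
-- }
--
--
-- def _slug(s):
--     """Collect maximal runs of alphanumeric characters of s.lower(), joined by '_'."""
--     tokens = []
--     cur = ""
--     for ch in s.lower():
--         if ch.isalnum():
--             cur += ch
--         elif cur:
--             tokens.append(cur)
--             cur = ""
--     if cur:
--         tokens.append(cur)
--     return "_".join(tokens)
--
--
-- def _detmir_attribute_code(attribute_key: str, attribute_name: str | None = None) -> str:
--     raw_key = str(attribute_key or "").strip()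
--     if raw_key in _DETMIR_SHARED_ATTRIBUTE_CODES:
--         return _DETMIR_SHARED_ATTRIBUTE_CODES[raw_key]
--     safe = _slug(raw_key)
--     if not safe:
--         safe = _slug(str(attribute_name or "field")) or "field"
--     return f"detmir_attr_{safe}"
-- ===== Notes on version B (the rewrite author's own statement) =====
-- stated objective: simpler
-- what changed: A normalizes by mapping every non-alphanumeric character to an underscore, splitting the result on underscores and re-joining the non-empty parts (twice: key and fallback); B replaces that three-pass pipeline by one helper that scans the lowercased string once, collecting maximal runs of alphanumeric characters as tokens and joining them with underscores.
import Mathlib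
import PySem

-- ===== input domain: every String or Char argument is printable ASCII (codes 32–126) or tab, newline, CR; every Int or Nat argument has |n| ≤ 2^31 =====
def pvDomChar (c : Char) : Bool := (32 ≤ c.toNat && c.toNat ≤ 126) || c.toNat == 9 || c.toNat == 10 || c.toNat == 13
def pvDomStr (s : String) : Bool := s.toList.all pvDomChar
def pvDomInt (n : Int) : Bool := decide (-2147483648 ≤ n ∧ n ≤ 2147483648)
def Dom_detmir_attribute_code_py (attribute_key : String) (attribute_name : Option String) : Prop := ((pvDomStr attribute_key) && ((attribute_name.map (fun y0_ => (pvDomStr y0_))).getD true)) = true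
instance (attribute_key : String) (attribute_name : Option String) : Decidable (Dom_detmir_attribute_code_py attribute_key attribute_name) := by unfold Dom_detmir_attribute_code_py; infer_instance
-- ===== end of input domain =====

-- B replaces A's replace-every-delimiter-then-split-then-rejoin pipeline by a single helper that
-- collects maximal runs of alphanumeric characters and joins them with underscores (objective: simpler).

-- ===== PORT A =====
def pvSharedDict : PySem.Dict String String :=
  PySem.Dict.ofList
    [("brand", "brand"), ("model", "model"), ("strana_proizvodstva", "country_of_origin"),
     ("pol", "gender"), ("material_igr_osn", "material"), ("cvet_f", "color"),
     ("equipment", "equipment")]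

-- `str(attribute_name or "field")` (shared by both Pythons)
def pvNameOrField : Option String → List Char
  | some n => if n == "" then "field".toList else n.toList
  | none => "field".toList

-- `ch if ch.isalnum() or ch == "_" else "_"`
def pvKeep (ch : Char) : Char := if PySem.Chars.isalnum ch || ch == '_' then ch else '_'

def detmir_attribute_code_py (attribute_key : String) (attribute_name : Option String) : String :=
  let raw_key := PySem.Str.strip (if attribute_key = "" then "" else attribute_key)
  match pvSharedDict.get? raw_key with
  | some v => v
  | none =>
    let safe0 := PySem.Chars.strip (PySem.Chars.lower raw_key.toList)
    let safe1 := safe0.map pvKeep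
    let safe2 := PySem.Chars.join ['_'] ((PySem.Chars.splitOn safe1 ['_']).filter (fun part => !part.isEmpty))
    let safe3 :=
      if safe2.isEmpty then
        let fb0 := PySem.Chars.lower (PySem.Chars.strip (pvNameOrField attribute_name))
        let fb1 := fb0.map pvKeep
        let fb2 := PySem.Chars.join ['_'] ((PySem.Chars.splitOn fb1 ['_']).filter (fun part => !part.isEmpty))
        if fb2.isEmpty then "field".toList else fb2
      else safe2
    String.mk ("detmir_attr_".toList ++ safe3)

-- ===== PORT B =====
def pvSlugStep (st : List (List Char) × List Char) (ch : Char) : List (List Char) × List Char :=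
  if PySem.Chars.isalnum ch then (st.1, st.2 ++ [ch])
  else if !st.2.isEmpty then (st.1 ++ [st.2], [])
  else st

def pvSlugTokens (st : List (List Char) × List Char) : List (List Char) :=
  if st.2.isEmpty then st.1 else st.1 ++ [st.2]

def pvSlug (s : List Char) : List Char :=
  PySem.Chars.join ['_'] (pvSlugTokens ((PySem.Chars.lower s).foldl pvSlugStep ([], [])))

def detmir_attribute_code_py_alt (attribute_key : String) (attribute_name : Option String) : String :=
  let raw_key := PySem.Str.strip (if attribute_key = "" then "" else attribute_key)
  match pvSharedDict.get? raw_key with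
  | some v => v
  | none =>
    let safe := pvSlug raw_key.toList
    let safe2 :=
      if safe.isEmpty then
        let fb := pvSlug (pvNameOrField attribute_name)
        if fb.isEmpty then "field".toList else fb
      else safe
    String.mk ("detmir_attr_".toList ++ safe2)

-- ===== PRECONDITION & SPEC =====
def Spec_detmir_attribute_code_py (attribute_key : String) (attribute_name : Option String) (out : String) : Prop := out = detmir_attribute_code_py_alt attribute_key attribute_name
instance (attribute_key : String) (attribute_name : Option String) (out : String) : Decidable (Spec_detmir_attribute_code_py attribute_key attribute_name out) := by unfold Spec_detmir_attribute_code_py; infer_instance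

-- ===== CLAIM (what is proved, stated in full; the proofs are below) =====
def Claim_equal_detmir_attribute_code_py : Prop := ∀ (attribute_key : String) (attribute_name : Option String), Dom_detmir_attribute_code_py attribute_key attribute_name → Spec_detmir_attribute_code_py attribute_key attribute_name (detmir_attribute_code_py attribute_key attribute_name)

-- ===== LEMMAS AND PROOFS =====

-- the common specification of both slug computations: maximal alnum runs joined by '_'
def pvP (c : Char) : Bool := !PySem.Chars.isalnum c

def pvSpecSlug (l : List Char) : List Char :=
  PySem.Chars.join ['_'] ((List.splitOnP pvP l).filter (fun x => !x.isEmpty))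

lemma pv_modifyHead_nil (xs : List (List Char)) :
    xs.modifyHead (fun t => ([] : List Char) ++ t) = xs := by
  cases xs <;> simp

lemma pv_modifyHead_id (xs : List (List Char)) :
    xs.modifyHead (fun t => t) = xs := by
  cases xs <;> simp

lemma pv_modifyHead_append {α : Type} (f : α → α) (a b : List α) (h : a ≠ []) :
    (a ++ b).modifyHead f = a.modifyHead f ++ b := by
  cases a with
  | nil => exact absurd rfl h
  | cons x xs => simp

-- characterisation of PySem's fueled split by Lean's splitOnP
lemma pv_go : ∀ (fuel : Nat) (l cur : List Char) (acc : List (List Char)), l.length ≤ fuel →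
    PySem.Chars.splitOn.go ['_'] fuel l cur acc =
      acc.reverse ++ (List.splitOnP (fun c => c == '_') l).modifyHead (fun t => cur.reverse ++ t)
  | fuel, [], cur, acc, _ => by
      cases fuel <;> simp [PySem.Chars.splitOn.go, List.splitOnP_nil]
  | 0, c :: rest, cur, acc, h => by simp at h
  | (fuel+1), c :: rest, cur, acc, h => by
      have hr : rest.length ≤ fuel := by simpa using h
      by_cases hc : c = '_'
      · subst hc
        have hstep : PySem.Chars.splitOn.go ['_'] (fuel+1) ('_' :: rest) cur acc =
            PySem.Chars.splitOn.go ['_'] fuel rest [] (cur.reverse :: acc) := by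
          simp [PySem.Chars.splitOn.go, List.isPrefixOf]
        rw [hstep, pv_go fuel rest [] _ hr, List.splitOnP_cons]
        simp [pv_modifyHead_nil, pv_modifyHead_id]
      · have hstep : PySem.Chars.splitOn.go ['_'] (fuel+1) (c :: rest) cur acc =
            PySem.Chars.splitOn.go ['_'] fuel rest (c :: cur) acc := by
          simp [PySem.Chars.splitOn.go, List.isPrefixOf, Ne.symm hc]
        rw [hstep, pv_go fuel rest (c :: cur) _ hr, List.splitOnP_cons]
        rcases he : List.splitOnP (fun c => c == '_') rest with _ | ⟨hd, tl⟩
        · exact absurd he (List.splitOnP_ne_nil _ _)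
        · simp [hc]

lemma pv_splitOn_underscore (l : List Char) :
    PySem.Chars.splitOn l ['_'] = List.splitOnP (fun c => c == '_') l := by
  unfold PySem.Chars.splitOn
  rw [pv_go (l.length + 1) l [] [] (by omega)]
  simp [pv_modifyHead_nil, pv_modifyHead_id]

lemma pv_alnum_ne_underscore (c : Char) (h : PySem.Chars.isalnum c = true) : (c == '_') = false := by
  cases hb : (c == '_')
  · rfl
  · have : c = '_' := by simpa using hb
    subst this
    exact absurd h (by decide)

lemma pv_keep_of_not_alnum (c : Char) (h : PySem.Chars.isalnum c = false) : pvKeep c = '_' := by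
  unfold pvKeep
  by_cases hc : c = '_'
  · subst hc; simp
  · simp [h, hc]

lemma pv_splitOnP_map (l : List Char) :
    List.splitOnP (fun c => c == '_') (l.map pvKeep) = List.splitOnP pvP l := by
  induction l with
  | nil => simp
  | cons c rest ih =>
    rw [List.map_cons, List.splitOnP_cons, List.splitOnP_cons, ih]
    cases ha : PySem.Chars.isalnum c
    · rw [pv_keep_of_not_alnum c ha]
      simp [pvP, ha]
    · have hk : pvKeep c = c := by unfold pvKeep; simp [ha]
      rw [hk, pv_alnum_ne_underscore c ha]
      simp [pvP, ha]

lemma pv_splitOnP_all (b : List Char) (h : ∀ c ∈ b, pvP c = true) :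
    List.splitOnP pvP b = List.replicate (b.length + 1) [] := by
  induction b with
  | nil => simp
  | cons c rest ih =>
    rw [List.splitOnP_cons, h c (by simp), ih (fun x hx => h x (by simp [hx]))]
    simp [List.replicate_succ]

lemma pv_splitOnP_append_right (l b : List Char) (h : ∀ c ∈ b, pvP c = true) :
    List.splitOnP pvP (l ++ b) = List.splitOnP pvP l ++ List.replicate b.length [] := by
  induction l with
  | nil => simp [pv_splitOnP_all b h, List.replicate_succ]
  | cons c rest ih =>
    rw [List.cons_append, List.splitOnP_cons, List.splitOnP_cons, ih]
    cases hp : pvP c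
    · simp only [Bool.false_eq_true, if_false]
      rw [pv_modifyHead_append _ _ _ (List.splitOnP_ne_nil _ _)]
    · simp

lemma pv_splitOnP_append_left (a l : List Char) (h : ∀ c ∈ a, pvP c = true) :
    List.splitOnP pvP (a ++ l) = List.replicate a.length [] ++ List.splitOnP pvP l := by
  induction a with
  | nil => simp
  | cons c rest ih =>
    rw [List.cons_append, List.splitOnP_cons, h c (by simp),
        ih (fun x hx => h x (by simp [hx]))]
    simp [List.replicate_succ]

lemma pv_slug_append_left (a l : List Char) (h : ∀ c ∈ a, PySem.Chars.isalnum c = false) :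
    pvSpecSlug (a ++ l) = pvSpecSlug l := by
  unfold pvSpecSlug
  rw [pv_splitOnP_append_left a l (fun c hc => by simp [pvP, h c hc]), List.filter_append]
  simp [List.filter_replicate]

lemma pv_slug_append_right (l b : List Char) (h : ∀ c ∈ b, PySem.Chars.isalnum c = false) :
    pvSpecSlug (l ++ b) = pvSpecSlug l := by
  unfold pvSpecSlug
  rw [pv_splitOnP_append_right l b (fun c hc => by simp [pvP, h c hc]), List.filter_append]
  simp [List.filter_replicate]

-- character-class facts (PySem's isspace/isalnum/lowerChar are explicit code-point ranges)
lemma pv_char_le_iff (a b : Char) : (a ≤ b) ↔ a.toNat ≤ b.toNat := by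
  rw [Char.le_def, UInt32.le_iff_toNat_le]
  exact Iff.rfl

lemma pv_isspace_nat (c : Char) (h : PySem.Chars.isspace c = true) :
    c.toNat = 32 ∨ (9 ≤ c.toNat ∧ c.toNat ≤ 13) ∨ (28 ≤ c.toNat ∧ c.toNat ≤ 31) ∨ 133 ≤ c.toNat := by
  unfold PySem.Chars.isspace at h
  simp only [Bool.or_eq_true, Bool.and_eq_true, decide_eq_true_eq] at h
  omega

lemma pv_isalnum_iff (c : Char) : PySem.Chars.isalnum c = true ↔
    (48 ≤ c.toNat ∧ c.toNat ≤ 57) ∨ (65 ≤ c.toNat ∧ c.toNat ≤ 90) ∨ (97 ≤ c.toNat ∧ c.toNat ≤ 122) := by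
  unfold PySem.Chars.isalnum PySem.Chars.isalpha PySem.Chars.isdigit PySem.Chars.isupper PySem.Chars.islower
  simp only [Bool.or_eq_true, Bool.and_eq_true, decide_eq_true_eq, pv_char_le_iff,
    show ('0' : Char).toNat = 48 from rfl, show ('9' : Char).toNat = 57 from rfl,
    show ('A' : Char).toNat = 65 from rfl, show ('Z' : Char).toNat = 90 from rfl,
    show ('a' : Char).toNat = 97 from rfl, show ('z' : Char).toNat = 122 from rfl]
  omega

lemma pv_isupper_iff (c : Char) : PySem.Chars.isupper c = true ↔
    (65 ≤ c.toNat ∧ c.toNat ≤ 90) := by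
  unfold PySem.Chars.isupper
  simp only [Bool.and_eq_true, decide_eq_true_eq, pv_char_le_iff,
    show ('A' : Char).toNat = 65 from rfl, show ('Z' : Char).toNat = 90 from rfl]

lemma pv_space_not_alnum (c : Char) (h : PySem.Chars.isspace c = true) :
    PySem.Chars.isalnum c = false := by
  rw [Bool.eq_false_iff]
  intro hc
  rw [pv_isalnum_iff] at hc
  have := pv_isspace_nat c h
  omega

lemma pv_space_lower_fixed (c : Char) (h : PySem.Chars.isspace c = true) :
    PySem.Chars.lowerChar c = c := by
  have hu : ¬ PySem.Chars.isupper c = true := by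
    rw [pv_isupper_iff]
    have := pv_isspace_nat c h
    omega
  unfold PySem.Chars.lowerChar
  rw [if_neg hu]

-- A's per-string pipeline computes the run spec
lemma pv_A_slug (l : List Char) :
    PySem.Chars.join ['_'] ((PySem.Chars.splitOn (l.map pvKeep) ['_']).filter (fun x => !x.isEmpty)) =
      pvSpecSlug l := by
  rw [pv_splitOn_underscore, pv_splitOnP_map]; rfl

-- B's accumulator loop computes the run spec
lemma pv_fold (l : List Char) : ∀ (tokens : List (List Char)) (cur : List Char),
    pvSlugTokens (l.foldl pvSlugStep (tokens, cur)) =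
      tokens ++ ((List.splitOnP pvP l).modifyHead (fun t => cur ++ t)).filter (fun x => !x.isEmpty) := by
  induction l with
  | nil =>
    intro tokens cur
    cases cur <;> simp [pvSlugTokens]
  | cons c rest ih =>
    intro tokens cur
    rw [List.foldl_cons]
    cases ha : PySem.Chars.isalnum c
    · have hp : pvP c = true := by simp [pvP, ha]
      have hstep : pvSlugStep (tokens, cur) c =
          (if cur.isEmpty then tokens else tokens ++ [cur], []) := by
        unfold pvSlugStep
        cases cur <;> simp [ha]
      rw [hstep, ih, List.splitOnP_cons, hp]
      cases cur <;> simp [pv_modifyHead_nil, pv_modifyHead_id]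
    · have hp : pvP c = false := by simp [pvP, ha]
      have hstep : pvSlugStep (tokens, cur) c = (tokens, cur ++ [c]) := by
        unfold pvSlugStep; simp [ha]
      rw [hstep, ih, List.splitOnP_cons, hp]
      rcases he : List.splitOnP pvP rest with _ | ⟨hd, tl⟩
      · exact absurd he (List.splitOnP_ne_nil _ _)
      · simp

lemma pv_B_slug (s : List Char) : pvSlug s = pvSpecSlug (PySem.Chars.lower s) := by
  unfold pvSlug pvSpecSlug
  rw [pv_fold (PySem.Chars.lower s) [] []]
  simp [pv_modifyHead_id]

-- splitting any list around its strip: whitespace prefix and suffix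
lemma pv_strip_decomp (l : List Char) :
    ∃ a b, (∀ c ∈ a, PySem.Chars.isspace c = true) ∧ (∀ c ∈ b, PySem.Chars.isspace c = true) ∧
      l = a ++ PySem.Chars.strip l ++ b := by
  refine ⟨List.takeWhile PySem.Chars.isspace l,
    (List.takeWhile PySem.Chars.isspace (List.dropWhile PySem.Chars.isspace l).reverse).reverse,
    fun c hc => List.mem_takeWhile_imp hc,
    fun c hc => List.mem_takeWhile_imp (List.mem_reverse.mp hc), ?_⟩
  unfold PySem.Chars.strip PySem.Chars.lstrip PySem.Chars.rstrip
  conv_lhs => rw [← List.takeWhile_append_dropWhile (p := PySem.Chars.isspace) (l := l)]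
  rw [List.append_assoc]
  congr 1
  conv_lhs => rw [← List.reverse_reverse (List.dropWhile PySem.Chars.isspace l),
    ← List.takeWhile_append_dropWhile (p := PySem.Chars.isspace)
      (l := (List.dropWhile PySem.Chars.isspace l).reverse)]
  rw [List.reverse_append]

lemma pv_slug_strip (l : List Char) : pvSpecSlug (PySem.Chars.strip l) = pvSpecSlug l := by
  obtain ⟨a, b, ha, hb, hl⟩ := pv_strip_decomp l
  conv_rhs => rw [hl]
  rw [List.append_assoc, pv_slug_append_left a _ (fun c hc => pv_space_not_alnum c (ha c hc)),
    pv_slug_append_right _ b (fun c hc => pv_space_not_alnum c (hb c hc))]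

lemma pv_slug_lower_strip (l : List Char) :
    pvSpecSlug (PySem.Chars.lower (PySem.Chars.strip l)) = pvSpecSlug (PySem.Chars.lower l) := by
  obtain ⟨a, b, ha, hb, hl⟩ := pv_strip_decomp l
  conv_rhs => rw [hl]
  unfold PySem.Chars.lower
  rw [List.map_append, List.map_append, List.append_assoc,
    pv_slug_append_left _ _ (fun c hc => by
      obtain ⟨x, hx, rfl⟩ := List.mem_map.mp hc
      rw [pv_space_lower_fixed x (ha x hx)]
      exact pv_space_not_alnum x (ha x hx)),
    pv_slug_append_right _ _ (fun c hc => by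
      obtain ⟨x, hx, rfl⟩ := List.mem_map.mp hc
      rw [pv_space_lower_fixed x (hb x hx)]
      exact pv_space_not_alnum x (hb x hx))]

-- ===== VERDICT (by name: the statement is the Claim_ definition above) =====
theorem detmir_attribute_code_py_spec : Claim_equal_detmir_attribute_code_py := by
  intro attribute_key attribute_name _hdom
  unfold Spec_detmir_attribute_code_py detmir_attribute_code_py detmir_attribute_code_py_alt
  dsimp only
  cases h : pvSharedDict.get? (PySem.Str.strip (if attribute_key = "" then "" else attribute_key)) with
  | some v => rfl
  | none =>
    have eqKey :
        PySem.Chars.join ['_'] ((PySem.Chars.splitOn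
            ((PySem.Chars.strip (PySem.Chars.lower
              (PySem.Str.strip (if attribute_key = "" then "" else attribute_key)).toList)).map pvKeep)
            ['_']).filter (fun part => !part.isEmpty)) =
          pvSlug (PySem.Str.strip (if attribute_key = "" then "" else attribute_key)).toList := by
      rw [pv_A_slug, pv_slug_strip, pv_B_slug]
    have eqFb :
        PySem.Chars.join ['_'] ((PySem.Chars.splitOn
            ((PySem.Chars.lower (PySem.Chars.strip (pvNameOrField attribute_name))).map pvKeep)
            ['_']).filter (fun part => !part.isEmpty)) =
          pvSlug (pvNameOrField attribute_name) := by
      rw [pv_A_slug, pv_slug_lower_strip, pv_B_slug]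
    rw [eqKey, eqFb]
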